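-- pv_equiv track=rewrite | github.com/XinweiChai/leetcode_problems | python/problem514.py | findRotateSteps3
-- ===== SOURCE A (Python) =====
-- import bisect
--
-- def findRotateSteps3(ring: str, key: str) -> int:
--     pos = {}
--     for idx, i in enumerate(ring):
--         pos[i] = pos.get(i, []) + [idx]
--     n = len(ring)
--     m = len(key)
--     # @lru_cache
--     memo = {}
--
--     def dfs(cur, p):
--         if p == m:
--             return 0
--         if (cur, p) in memo:
--             return memo[cur, p]
--         c = key[p]
--         if len(pos[c]) == 1:
--             memo[cur, p] = min(abs(pos[c][0] - cur), n - abs(cur - pos[c][0])) + dfs(pos[c][0], p + 1)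
--         else:
--             idx = bisect.bisect(pos[c], cur)
--             pr = pos[c][idx] if idx != len(pos[c]) else pos[c][0]
--             pl = pos[c][idx - 1] if idx != 0 else pos[c][-1]
--             memo[cur, p] = min(min(abs(pr - cur), n - abs(cur - pr)) + dfs(pr, p + 1),
--                                min(abs(pl - cur), n - abs(cur - pl)) + dfs(pl, p + 1))
--         return memo[cur, p]
--
--     return m + dfs(0, 0)
-- ===== SOURCE B (Python) =====
-- def findRotateSteps3(ring: str, key: str) -> int:
--     n, m = len(ring), len(key)
--     if m == 0:
--         return 0
--
--     def occ(c):
--         return [i for i, ch in enumerate(ring) if ch == c]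
--
--     prev = occ(key[0])
--     cost = [min(j, n - j) for j in prev]
--     for p in range(1, m):
--         cur = occ(key[p])
--         cost = [min(c + min(abs(j - i), n - abs(j - i)) for i, c in zip(prev, cost))
--                 for j in cur]
--         prev = cur
--     return m + min(cost)
-- ===== Notes on version B (the rewrite author's own statement) =====
-- stated objective: alternative
-- what changed: Replaced A's memoized top-down DFS that prunes each step to the two bisect-nearest occurrences of the key character by a bottom-up layered DP that relaxes over ALL occurrences of each key character (no dict, no bisect, no memo); equality rests on the circular triangle inequality, which makes A's two-neighbour pruning exact.
import Mathlib
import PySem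

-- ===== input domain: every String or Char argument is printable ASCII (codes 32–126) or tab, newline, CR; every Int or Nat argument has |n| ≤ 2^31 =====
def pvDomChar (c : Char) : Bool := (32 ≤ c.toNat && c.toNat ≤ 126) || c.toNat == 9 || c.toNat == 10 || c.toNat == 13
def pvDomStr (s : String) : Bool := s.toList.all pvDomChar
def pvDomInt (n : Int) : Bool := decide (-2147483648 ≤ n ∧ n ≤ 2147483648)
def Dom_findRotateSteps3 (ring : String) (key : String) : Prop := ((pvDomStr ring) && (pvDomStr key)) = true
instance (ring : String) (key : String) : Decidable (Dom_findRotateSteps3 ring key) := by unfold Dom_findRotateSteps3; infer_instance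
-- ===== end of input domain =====

-- B replaces A's memoized two-nearest-occurrence DFS by a bottom-up layered DP over all
-- occurrences of each key character (objective: alternative algorithm, not faster).

-- ===== PORT A =====
-- pos = {}; for idx, i in enumerate(ring): pos[i] = pos.get(i, []) + [idx]
def pvBuildPos (ringL : List Char) : PySem.Dict Char (List Int) :=
  (PySem.List.enumerate ringL).foldl
    (fun pos p => pos.modify p.2 [] (fun l => l ++ [p.1])) PySem.Dict.empty

-- the inner dfs(cur, p) with its threaded memo; fuel ≥ m - p + 1 on every real call, so
-- the fuel-0 branch is never taken.  pos[c] / key[p] use total getD forms: the KeyError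
-- on a key character absent from ring is excluded by Pre_findRotateSteps3.
def pvDfsA (pos : PySem.Dict Char (List Int)) (keyL : List Char) (n m : Int)
    (fuel : Nat) (cur p : Int) (memo : PySem.Dict (Int × Int) Int) :
    Int × PySem.Dict (Int × Int) Int :=
  match fuel with
  | 0 => (0, memo)
  | fuel + 1 =>
    if p = m then (0, memo)
    else
      match memo.get? (cur, p) with
      | some v => (v, memo)
      | none =>
        let c := PySem.List.pyGetD keyL p ' '
        let xs := pos.getD c []
        if xs.length = 1 then
          let x0 := PySem.List.pyGetD xs 0 0
          let rec1 := pvDfsA pos keyL n m fuel x0 (p + 1) memo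
          let v := min |x0 - cur| (n - |cur - x0|) + rec1.1
          (v, rec1.2.insert (cur, p) v)
        else
          let idx : Int := (PySem.List.bisectRight xs cur : Int)
          let pr := if idx ≠ xs.length then PySem.List.pyGetD xs idx 0
                    else PySem.List.pyGetD xs 0 0
          let pl := if idx ≠ 0 then PySem.List.pyGetD xs (idx - 1) 0
                    else PySem.List.pyGetD xs (-1) 0
          let rec1 := pvDfsA pos keyL n m fuel pr (p + 1) memo
          let rec2 := pvDfsA pos keyL n m fuel pl (p + 1) rec1.2
          let v := min (min |pr - cur| (n - |cur - pr|) + rec1.1)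
                       (min |pl - cur| (n - |cur - pl|) + rec2.1)
          (v, rec2.2.insert (cur, p) v)

def findRotateSteps3 (ring : String) (key : String) : Int :=
  let ringL := ring.toList
  let keyL := key.toList
  let pos := pvBuildPos ringL
  let n : Int := ringL.length
  let m : Int := keyL.length
  m + (pvDfsA pos keyL n m (keyL.length + 1) 0 0 PySem.Dict.empty).1

-- ===== PORT B =====
-- occ(c) = [i for i, ch in enumerate(ring) if ch == c]
def pvOcc (ringL : List Char) (c : Char) : List Int :=
  (PySem.List.enumerate ringL).filterMap (fun p => if p.2 = c then some p.1 else none)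

-- min(l); l = [] is Python's ValueError, excluded by Pre_findRotateSteps3
def pvMinList (l : List Int) : Int :=
  match l with
  | [] => 0
  | x :: xs => xs.foldl min x

-- min(c + min(abs(j - i), n - abs(j - i)) for i, c in zip(prev, cost))
def pvStepB (n : Int) (prev cost : List Int) (j : Int) : Int :=
  pvMinList ((prev.zip cost).map (fun ic => ic.2 + min |j - ic.1| (n - |j - ic.1|)))

def findRotateSteps3_alt (ring : String) (key : String) : Int :=
  let n : Int := ring.toList.length
  let m : Int := key.toList.length
  match key.toList with
  | [] => 0
  | k0 :: krest =>
    let prev0 := pvOcc ring.toList k0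
    let cost0 := prev0.map (fun j => min j (n - j))
    let res := krest.foldl
      (fun (pc : List Int × List Int) c =>
        let cur := pvOcc ring.toList c
        (cur, cur.map (pvStepB n pc.1 pc.2))) (prev0, cost0)
    m + pvMinList res.2

-- ===== PRECONDITION & SPEC =====
-- Pre_ excludes exactly the inputs where A raises KeyError: a key character absent from ring.
def Pre_findRotateSteps3 (ring : String) (key : String) : Prop :=
  (key.toList.all (fun c => ring.toList.contains c)) = true
instance (ring : String) (key : String) : Decidable (Pre_findRotateSteps3 ring key) := by
  unfold Pre_findRotateSteps3; infer_instance

def pvWitness_findRotateSteps3 : String × String := ("ab", "b")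

def Spec_findRotateSteps3 (ring : String) (key : String) (out : Int) : Prop :=
  out = findRotateSteps3_alt ring key
instance (ring : String) (key : String) (out : Int) : Decidable (Spec_findRotateSteps3 ring key out) := by
  unfold Spec_findRotateSteps3; infer_instance

-- ===== CLAIM (what is proved, stated in full; the proofs are below) =====
def Claim_equal_findRotateSteps3 : Prop := ∀ (ring : String) (key : String), Dom_findRotateSteps3 ring key → Pre_findRotateSteps3 ring key → Spec_findRotateSteps3 ring key (findRotateSteps3 ring key)

-- ===== LEMMAS AND PROOFS =====

-- circular distance and the clockwise arc length, for the proofs only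
def pvD (n a b : Int) : Int := min |a - b| (n - |a - b|)
def pvCW (n a b : Int) : Int := if a ≤ b then b - a else b - a + n

-- the mathematical all-occurrences recurrence (B's value)
def pvG (ringL : List Char) (n : Int) : List Char → Int → Int
  | [], _ => 0
  | c :: ks, cur => pvMinList ((pvOcc ringL c).map (fun x => pvD n cur x + pvG ringL n ks x))

-- minimum of f over a list (0 on [])
def pvMO (l : List Int) (f : Int → Int) : Int := pvMinList (l.map f)

-- A's pruned neighbours
def pvPr (xs : List Int) (cur : Int) : Int :=
  let idx : Int := (PySem.List.bisectRight xs cur : Int)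
  if idx ≠ xs.length then PySem.List.pyGetD xs idx 0 else PySem.List.pyGetD xs 0 0
def pvPl (xs : List Int) (cur : Int) : Int :=
  let idx : Int := (PySem.List.bisectRight xs cur : Int)
  if idx ≠ 0 then PySem.List.pyGetD xs (idx - 1) 0 else PySem.List.pyGetD xs (-1) 0

-- the mathematical memo-free version of A's dfs
def pvN (ringL : List Char) (n : Int) : List Char → Int → Int
  | [], _ => 0
  | c :: ks, cur =>
    let xs := pvOcc ringL c
    if xs.length = 1 then
      let x0 := PySem.List.pyGetD xs 0 0
      min |x0 - cur| (n - |cur - x0|) + pvN ringL n ks x0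
    else
      let pr := pvPr xs cur
      let pl := pvPl xs cur
      min (min |pr - cur| (n - |cur - pr|) + pvN ringL n ks pr)
          (min |pl - cur| (n - |cur - pl|) + pvN ringL n ks pl)

-- ---- minimum-over-a-list toolkit ----
theorem pvFoldlMin_le {l : List Int} {a : Int} : l.foldl min a ≤ a ∧ ∀ y ∈ l, l.foldl min a ≤ y := by
  induction l generalizing a with
  | nil => simp
  | cons x t ih =>
    refine ⟨le_trans (ih (a := min a x)).1 (by simp), ?_⟩
    intro y hy
    rcases List.mem_cons.1 hy with h | h
    · exact le_trans (ih (a := min a x)).1 (by rw [h]; simp)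
    · exact (ih (a := min a x)).2 _ h

theorem pvLe_foldlMin {l : List Int} {a b : Int} (ha : b ≤ a) (h : ∀ y ∈ l, b ≤ y) :
    b ≤ l.foldl min a := by
  induction l generalizing a with
  | nil => simpa
  | cons x t ih =>
    exact ih (le_min ha (h x (by simp))) (fun y hy => h y (by simp [hy]))

theorem pvMO_le {l : List Int} {f : Int → Int} {x : Int} (hx : x ∈ l) : pvMO l f ≤ f x := by
  cases l with
  | nil => cases hx
  | cons a t =>
    rcases List.mem_cons.1 hx with rfl | hx
    · exact (pvFoldlMin_le (l := t.map f)).1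
    · exact (pvFoldlMin_le (l := t.map f)).2 _ (List.mem_map_of_mem hx)

theorem pvLe_MO {l : List Int} {f : Int → Int} {b : Int} (hne : l ≠ [])
    (h : ∀ x ∈ l, b ≤ f x) : b ≤ pvMO l f := by
  cases l with
  | nil => exact absurd rfl hne
  | cons a t =>
    exact pvLe_foldlMin (h a (by simp)) (by
      intro y hy
      rcases List.mem_map.1 hy with ⟨x, hx, rfl⟩
      exact h x (by simp [hx]))

theorem pvFoldlMin_mem {l : List Int} {a : Int} : l.foldl min a = a ∨ l.foldl min a ∈ l := by
  induction l generalizing a with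
  | nil => simp
  | cons x t ih =>
    simp only [List.foldl_cons]
    rcases ih (a := min a x) with h | h
    · rcases min_cases a x with ⟨h1, _⟩ | ⟨h1, _⟩
      · left; rw [h, h1]
      · right; rw [h, h1]; simp
    · right; simp only [List.mem_cons]; right; exact h

theorem pvMO_attain {l : List Int} {f : Int → Int} (hne : l ≠ []) : ∃ x ∈ l, pvMO l f = f x := by
  cases l with
  | nil => exact absurd rfl hne
  | cons a t =>
    rcases pvFoldlMin_mem (l := t.map f) (a := f a) with h | h
    · exact ⟨a, by simp, h⟩
    · rcases List.mem_map.1 h with ⟨x, hx, hfx⟩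
      exact ⟨x, by simp [hx], hfx.symm⟩

theorem pvMO_congr {l : List Int} {f g : Int → Int} (h : ∀ x ∈ l, f x = g x) :
    pvMO l f = pvMO l g := by
  unfold pvMO
  rw [List.map_congr_left h]

theorem pvMO_add_const {l : List Int} {u : Int → Int} {cst : Int} (hne : l ≠ []) :
    pvMO l (fun x => cst + u x) = cst + pvMO l u := by
  apply le_antisymm
  · rcases pvMO_attain (f := u) hne with ⟨x, hx, hxe⟩
    have h1 := pvMO_le (l := l) (f := fun x => cst + u x) hx
    simp only at h1
    omega
  · apply pvLe_MO hne
    intro x hx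
    have h1 := pvMO_le (l := l) (f := u) hx
    omega

theorem pvMO_exchange {A B : List Int} {g : Int → Int → Int} {h : Int → Int}
    (hA : A ≠ []) (hB : B ≠ []) :
    pvMO A (fun j => pvMO B (fun i => g i j) + h j) =
      pvMO B (fun i => pvMO A (fun j => g i j + h j)) := by
  apply le_antisymm
  · apply pvLe_MO hB
    intro i hi
    apply pvLe_MO hA
    intro j hj
    calc pvMO A (fun j => pvMO B (fun i => g i j) + h j) ≤ pvMO B (fun i => g i j) + h j :=
          pvMO_le hj
      _ ≤ g i j + h j := by
          have h2 := pvMO_le (l := B) (f := fun i => g i j) hi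
          simp only at h2; omega
  · apply pvLe_MO hA
    intro j hj
    rcases pvMO_attain (l := B) (f := fun i => g i j) hB with ⟨i, hi, hieq⟩
    calc pvMO B (fun i => pvMO A (fun j => g i j + h j)) ≤ pvMO A (fun j => g i j + h j) :=
          pvMO_le hi
      _ ≤ g i j + h j := pvMO_le hj
      _ = pvMO B (fun i => g i j) + h j := by omega

-- ---- occurrence-list facts ----
theorem pvOcc_bounds {ringL : List Char} {c : Char} {x : Int} (hx : x ∈ pvOcc ringL c) :
    0 ≤ x ∧ x < (ringL.length : Int) := by
  unfold pvOcc at hx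
  rcases List.mem_filterMap.1 hx with ⟨p, hp, hpx⟩
  rcases (PySem.List.mem_enumerate_iff _ _ _).1 hp with ⟨k, hk, rfl⟩
  split_ifs at hpx with h
  · simp only [Option.some.injEq] at hpx
    subst hpx; simp; omega

theorem pvOcc_sorted {ringL : List Char} {c : Char} :
    (pvOcc ringL c).Pairwise (· < ·) := by
  unfold pvOcc
  apply List.Pairwise.filterMap _ ?_ (PySem.List.pairwise_lt_enumerate ringL 0)
  intro p q hpq a ha b hb
  by_cases hp : p.2 = c
  · by_cases hq : q.2 = c
    · rw [if_pos hp] at ha; rw [if_pos hq] at hb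
      cases ha; cases hb; exact hpq
    · rw [if_neg hq] at hb; cases hb
  · rw [if_neg hp] at ha; cases ha

theorem pvOcc_ne_nil {ringL : List Char} {c : Char} (hc : c ∈ ringL) : pvOcc ringL c ≠ [] := by
  rcases List.mem_iff_getElem.1 hc with ⟨k, hk, hkc⟩
  apply List.ne_nil_of_mem (a := ((0:Int) + k))
  unfold pvOcc
  refine List.mem_filterMap.2 ⟨((0:Int) + k, ringL[k]), (PySem.List.mem_enumerate_iff _ _ _).2 ⟨k, hk, rfl⟩, ?_⟩
  rw [if_pos hkc]

-- ---- pos dict = occurrence lists ----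
theorem pvBuildPos_step (l : List (Int × Char)) :
    ∀ (d : PySem.Dict Char (List Int)) (c : Char),
      (l.foldl (fun pos p => pos.modify p.2 [] (fun L => L ++ [p.1])) d).getD c []
        = d.getD c [] ++ l.filterMap (fun p => if p.2 = c then some p.1 else none) := by
  induction l with
  | nil => intro d c; simp
  | cons p t ih =>
    intro d c
    simp only [List.foldl_cons, List.filterMap_cons]
    rw [ih]
    by_cases h : p.2 = c
    · rw [if_pos h, ← h, PySem.Dict.getD_modify_self]
      simp
    · rw [if_neg h, PySem.Dict.getD_modify_of_ne]
      exact fun hcp => h hcp.symm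

theorem pvBuildPos_getD (ringL : List Char) (c : Char) :
    (pvBuildPos ringL).getD c [] = pvOcc ringL c := by
  unfold pvBuildPos pvOcc
  rw [pvBuildPos_step]
  simp

-- ---- circular-arc arithmetic ----
theorem pvD_eq_min_cw {n a b : Int} (ha : 0 ≤ a) (ha' : a < n) (hb : 0 ≤ b) (hb' : b < n) :
    pvD n a b = min (pvCW n a b) (pvCW n b a) := by
  unfold pvD pvCW
  rcases abs_cases (a - b) with ⟨e1, s1⟩ | ⟨e1, s1⟩ <;> split_ifs <;> omega

theorem pvD_triangle {n a b c : Int} (ha : 0 ≤ a) (ha' : a < n) (hb : 0 ≤ b) (hb' : b < n)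
    (hc : 0 ≤ c) (hc' : c < n) : pvD n a c ≤ pvD n a b + pvD n b c := by
  unfold pvD
  rcases abs_cases (a - b) with ⟨e1, s1⟩ | ⟨e1, s1⟩ <;>
    rcases abs_cases (b - c) with ⟨e2, s2⟩ | ⟨e2, s2⟩ <;>
      rcases abs_cases (a - c) with ⟨e3, s3⟩ | ⟨e3, s3⟩ <;> omega

theorem pvD_nonneg {n a b : Int} (ha : 0 ≤ a) (ha' : a < n) (hb : 0 ≤ b) (hb' : b < n) :
    0 ≤ pvD n a b := by
  unfold pvD
  rcases abs_cases (a - b) with ⟨e1, s1⟩ | ⟨e1, s1⟩ <;> omega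

theorem pvD_self {n a : Int} (ha : 0 ≤ a) (ha' : a < n) : pvD n a a = 0 := by
  unfold pvD; simp; omega

theorem pvD_comm (n a b : Int) : pvD n a b = pvD n b a := by
  unfold pvD; rw [abs_sub_comm]

-- prefix decomposition of the clockwise arc
theorem pvCW_prefix {n p q r : Int} (hp : 0 ≤ p) (hp' : p < n) (hq : 0 ≤ q) (hq' : q < n)
    (hr : 0 ≤ r) (hr' : r < n) (h : pvCW n p q ≤ pvCW n p r) :
    pvCW n q r = pvCW n p r - pvCW n p q := by
  unfold pvCW at *; split_ifs at * <;> omega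

theorem pvCW_suffix {n p q r : Int} (hp : 0 ≤ p) (hp' : p < n) (hq : 0 ≤ q) (hq' : q < n)
    (hr : 0 ≤ r) (hr' : r < n) (h : pvCW n q r ≤ pvCW n p r) :
    pvCW n p q = pvCW n p r - pvCW n q r := by
  unfold pvCW at *; split_ifs at * <;> omega

-- ---- neighbour characterisation ----
theorem pvPr_mem {xs : List Int} {cur : Int} (hne : xs ≠ []) (hs : xs.Pairwise (· ≤ ·)) :
    pvPr xs cur ∈ xs := by
  unfold pvPr
  have hk := (PySem.List.bisectRight_spec xs cur hs).1
  by_cases h : ((PySem.List.bisectRight xs cur : Int)) ≠ (xs.length : Int)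
  · rw [if_pos h]
    have hklt : PySem.List.bisectRight xs cur < xs.length := by omega
    rw [PySem.List.pyGetD_natCast, List.getD_eq_getElem _ _ hklt]
    exact List.getElem_mem _
  · rw [if_neg h]
    cases xs with
    | nil => exact absurd rfl hne
    | cons a t => rw [PySem.List.pyGetD_zero_cons]; exact List.mem_cons_self

theorem pvPl_mem {xs : List Int} {cur : Int} (hne : xs ≠ []) (hs : xs.Pairwise (· ≤ ·)) :
    pvPl xs cur ∈ xs := by
  unfold pvPl
  have hk := (PySem.List.bisectRight_spec xs cur hs).1
  by_cases h : ((PySem.List.bisectRight xs cur : Int)) ≠ 0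
  · rw [if_pos h]
    have h0 : (0:Int) ≤ (PySem.List.bisectRight xs cur : Int) - 1 := by omega
    have h1 : (PySem.List.bisectRight xs cur : Int) - 1 < (xs.length : Int) := by omega
    rw [PySem.List.pyGetD_eq_getElem xs 0 h0 h1]
    exact List.getElem_mem _
  · rw [if_neg h, PySem.List.pyGetD_neg_one xs 0 hne]
    exact List.getLast_mem hne

theorem pvMonoGet {xs : List Int} (hs : xs.Pairwise (· ≤ ·)) :
    ∀ (i j : Nat) (hi : i < xs.length) (hj : j < xs.length), i ≤ j → xs[i] ≤ xs[j] := by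
  intro i j hi hj hij
  rcases lt_or_eq_of_le hij with h | h
  · exact List.pairwise_iff_getElem.1 hs i j hi hj h
  · subst h; exact le_refl _

theorem pvPr_cw_min {n : Int} {xs : List Int} {cur : Int} (hne : xs ≠ [])
    (hs : xs.Pairwise (· ≤ ·)) (hbd : ∀ y ∈ xs, 0 ≤ y ∧ y < n)
    (hc : 0 ≤ cur) (hc' : cur < n) (hni : cur ∉ xs) :
    ∀ y ∈ xs, pvCW n cur (pvPr xs cur) ≤ pvCW n cur y := by
  obtain ⟨hk1, hk2, hk3⟩ := PySem.List.bisectRight_spec xs cur hs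
  intro y hy
  rcases List.mem_iff_getElem.1 hy with ⟨j, hj, rfl⟩
  have hyb := hbd _ (List.getElem_mem hj)
  have hyne : xs[j] ≠ cur := fun h => hni (h ▸ List.getElem_mem hj)
  unfold pvPr
  by_cases hcase : ((PySem.List.bisectRight xs cur : Int)) ≠ (xs.length : Int)
  · rw [if_pos hcase]
    have hklt : PySem.List.bisectRight xs cur < xs.length := by omega
    rw [PySem.List.pyGetD_natCast, List.getD_eq_getElem _ _ hklt]
    have hcurlt : cur < xs[PySem.List.bisectRight xs cur] := hk3 _ hklt le_rfl
    have hprb := hbd _ (List.getElem_mem hklt)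
    by_cases hjk : j < PySem.List.bisectRight xs cur
    · have h1 := hk2 j hj hjk
      unfold pvCW; split_ifs <;> omega
    · have h1 : xs[PySem.List.bisectRight xs cur] ≤ xs[j] := pvMonoGet hs _ j hklt hj (by omega)
      unfold pvCW; split_ifs <;> omega
  · rw [if_neg hcase]
    have hlpos : 0 < xs.length := List.length_pos_iff.2 hne
    rw [PySem.List.pyGetD_eq_getElem xs 0 le_rfl (by exact_mod_cast hlpos)]
    simp only [Int.toNat_zero]
    have h0b := hbd _ (List.getElem_mem hlpos)
    have h0ne : xs[0] ≠ cur := fun h => hni (h ▸ List.getElem_mem hlpos)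
    have h1 : xs[0] ≤ cur := hk2 0 hlpos (by omega)
    have h2 : xs[j] ≤ cur := hk2 j hj (by omega)
    have h3 : xs[0] ≤ xs[j] := pvMonoGet hs 0 j hlpos hj (Nat.zero_le _)
    unfold pvCW; split_ifs <;> omega

theorem pvPl_ccw_min {n : Int} {xs : List Int} {cur : Int} (hne : xs ≠ [])
    (hs : xs.Pairwise (· ≤ ·)) (hbd : ∀ y ∈ xs, 0 ≤ y ∧ y < n)
    (hc : 0 ≤ cur) (hc' : cur < n) (hni : cur ∉ xs) :
    ∀ y ∈ xs, pvCW n (pvPl xs cur) cur ≤ pvCW n y cur := by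
  obtain ⟨hk1, hk2, hk3⟩ := PySem.List.bisectRight_spec xs cur hs
  intro y hy
  rcases List.mem_iff_getElem.1 hy with ⟨j, hj, rfl⟩
  have hyb := hbd _ (List.getElem_mem hj)
  have hyne : xs[j] ≠ cur := fun h => hni (h ▸ List.getElem_mem hj)
  unfold pvPl
  by_cases hcase : ((PySem.List.bisectRight xs cur : Int)) ≠ 0
  · rw [if_pos hcase]
    have hklt : PySem.List.bisectRight xs cur - 1 < xs.length := by omega
    have htn : ((PySem.List.bisectRight xs cur : Int) - 1).toNat = PySem.List.bisectRight xs cur - 1 := by omega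
    rw [PySem.List.pyGetD_eq_getElem xs 0 (by omega) (by omega)]
    simp only [htn]
    have hplb := hbd _ (List.getElem_mem hklt)
    have hplne : xs[PySem.List.bisectRight xs cur - 1] ≠ cur :=
      fun h => hni (h ▸ List.getElem_mem hklt)
    have h1 : xs[PySem.List.bisectRight xs cur - 1] ≤ cur := hk2 _ hklt (by omega)
    by_cases hjk : j < PySem.List.bisectRight xs cur
    · have h2 : xs[j] ≤ xs[PySem.List.bisectRight xs cur - 1] :=
        pvMonoGet hs j _ hj hklt (by omega)
      unfold pvCW; split_ifs <;> omega
    · have h2 : cur < xs[j] := hk3 j hj (by omega)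
      unfold pvCW; split_ifs <;> omega
  · rw [if_neg hcase, PySem.List.pyGetD_neg_one xs 0 hne, List.getLast_eq_getElem hne]
    have hlpos : 0 < xs.length := List.length_pos_iff.2 hne
    have hlast : xs.length - 1 < xs.length := by omega
    have hlb := hbd _ (List.getElem_mem hlast)
    have hlne : xs[xs.length - 1] ≠ cur := fun h => hni (h ▸ List.getElem_mem hlast)
    have h1 : cur < xs[xs.length - 1] := hk3 _ hlast (by omega)
    have h2 : cur < xs[j] := hk3 j hj (by omega)
    have h3 : xs[j] ≤ xs[xs.length - 1] := pvMonoGet hs j _ hj hlast (by omega)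
    unfold pvCW; split_ifs <;> omega

theorem pvPl_self {xs : List Int} {cur : Int} (hs : xs.Pairwise (· ≤ ·)) (hc : cur ∈ xs) :
    pvPl xs cur = cur := by
  obtain ⟨hk1, hk2, hk3⟩ := PySem.List.bisectRight_spec xs cur hs
  rcases List.mem_iff_getElem.1 hc with ⟨t, ht, htc⟩
  have htk : t < PySem.List.bisectRight xs cur := by
    by_contra h
    exact absurd (htc ▸ hk3 t ht (by omega)) (lt_irrefl cur)
  unfold pvPl
  rw [if_pos (by omega : ((PySem.List.bisectRight xs cur : Int)) ≠ 0)]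
  have hklt : PySem.List.bisectRight xs cur - 1 < xs.length := by omega
  have htn : ((PySem.List.bisectRight xs cur : Int) - 1).toNat = PySem.List.bisectRight xs cur - 1 := by omega
  rw [PySem.List.pyGetD_eq_getElem xs 0 (by omega) (by omega)]
  simp only [htn]
  have h1 : xs[PySem.List.bisectRight xs cur - 1] ≤ cur := hk2 _ hklt (by omega)
  have h2 : cur ≤ xs[PySem.List.bisectRight xs cur - 1] :=
    htc ▸ pvMonoGet hs t _ ht hklt (by omega)
  omega

-- via one of A's two neighbours the circular route to any occurrence is no longer
theorem pvNeighbor {n : Int} {xs : List Int} {cur x : Int} (hne : xs ≠ [])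
    (hs : xs.Pairwise (· ≤ ·)) (hbd : ∀ y ∈ xs, 0 ≤ y ∧ y < n)
    (hc : 0 ≤ cur) (hc' : cur < n) (hni : cur ∉ xs) (hx : x ∈ xs) :
    pvD n cur (pvPr xs cur) + pvD n (pvPr xs cur) x ≤ pvD n cur x ∨
    pvD n cur (pvPl xs cur) + pvD n (pvPl xs cur) x ≤ pvD n cur x := by
  have hprb := hbd _ (pvPr_mem hne hs (cur := cur))
  have hplb := hbd _ (pvPl_mem hne hs (cur := cur))
  have hxb := hbd _ hx
  by_cases hcw : pvCW n cur x ≤ pvCW n x cur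
  · left
    have h1 := pvPr_cw_min hne hs hbd hc hc' hni x hx
    have h2 := pvCW_prefix hc hc' hprb.1 hprb.2 hxb.1 hxb.2 h1
    have d1 : pvD n cur (pvPr xs cur) ≤ pvCW n cur (pvPr xs cur) := by
      rw [pvD_eq_min_cw hc hc' hprb.1 hprb.2]; exact min_le_left _ _
    have d2 : pvD n (pvPr xs cur) x ≤ pvCW n (pvPr xs cur) x := by
      rw [pvD_eq_min_cw hprb.1 hprb.2 hxb.1 hxb.2]; exact min_le_left _ _
    have d3 : pvD n cur x = pvCW n cur x := by
      rw [pvD_eq_min_cw hc hc' hxb.1 hxb.2]; omega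
    omega
  · right
    rw [not_le] at hcw
    have h1 := pvPl_ccw_min hne hs hbd hc hc' hni x hx
    have h2 := pvCW_suffix hxb.1 hxb.2 hplb.1 hplb.2 hc hc' h1
    have d1 : pvD n cur (pvPl xs cur) ≤ pvCW n (pvPl xs cur) cur := by
      rw [pvD_eq_min_cw hc hc' hplb.1 hplb.2]; exact min_le_right _ _
    have d2 : pvD n (pvPl xs cur) x ≤ pvCW n x (pvPl xs cur) := by
      rw [pvD_eq_min_cw hplb.1 hplb.2 hxb.1 hxb.2]; exact min_le_right _ _
    have d3 : pvD n cur x = pvCW n x cur := by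
      rw [pvD_eq_min_cw hc hc' hxb.1 hxb.2]; omega
    omega

-- ---- the all-occurrences recurrence ----
theorem pvG_eq_MO (ringL : List Char) (n : Int) (c : Char) (ks : List Char) (cur : Int) :
    pvG ringL n (c :: ks) cur = pvMO (pvOcc ringL c) (fun x => pvD n cur x + pvG ringL n ks x) := rfl

theorem pvG_lipschitz {ringL : List Char} {ks : List Char} {a b : Int}
    (hks : ∀ c ∈ ks, c ∈ ringL)
    (ha : 0 ≤ a) (ha' : a < (ringL.length : Int)) (hb : 0 ≤ b) (hb' : b < (ringL.length : Int)) :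
    pvG ringL (ringL.length : Int) ks a ≤ pvD (ringL.length : Int) a b + pvG ringL (ringL.length : Int) ks b := by
  cases ks with
  | nil => simpa [pvG] using pvD_nonneg ha ha' hb hb'
  | cons c ks =>
    have hocc : pvOcc ringL c ≠ [] := pvOcc_ne_nil (hks c (by simp))
    rw [pvG_eq_MO, pvG_eq_MO]
    have key : ∀ x ∈ pvOcc ringL c,
        pvMO (pvOcc ringL c) (fun x => pvD (ringL.length : Int) a x + pvG ringL (ringL.length : Int) ks x)
          - pvD (ringL.length : Int) a b ≤ pvD (ringL.length : Int) b x + pvG ringL (ringL.length : Int) ks x := by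
      intro x hxm
      have hxb := pvOcc_bounds hxm
      have htri := pvD_triangle ha ha' hb hb' hxb.1 hxb.2
      have h1 := pvMO_le (l := pvOcc ringL c)
        (f := fun x => pvD (ringL.length : Int) a x + pvG ringL (ringL.length : Int) ks x) hxm
      simp only at h1
      omega
    have h2 := pvLe_MO hocc key
    omega

theorem pvN_eq_pvG {ringL : List Char} {ks : List Char} {cur : Int}
    (hks : ∀ c ∈ ks, c ∈ ringL) (hc : 0 ≤ cur) (hc' : cur < (ringL.length : Int)) :
    pvN ringL (ringL.length : Int) ks cur = pvG ringL (ringL.length : Int) ks cur := by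
  induction ks generalizing cur with
  | nil => rfl
  | cons c ks ih =>
    have hcr : c ∈ ringL := hks c (by simp)
    have hks' : ∀ c' ∈ ks, c' ∈ ringL := fun c' hc' => hks c' (by simp [hc'])
    have hocc : pvOcc ringL c ≠ [] := pvOcc_ne_nil hcr
    have hsort : (pvOcc ringL c).Pairwise (· ≤ ·) := pvOcc_sorted.imp le_of_lt
    have hbd : ∀ y ∈ pvOcc ringL c, 0 ≤ y ∧ y < (ringL.length : Int) :=
      fun y hy => pvOcc_bounds hy
    simp only [pvN, pvG_eq_MO]
    by_cases hlen : (pvOcc ringL c).length = 1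
    · rw [if_pos hlen]
      match hxs : pvOcc ringL c, hlen with
      | [x0], _ =>
        rw [PySem.List.pyGetD_zero_cons]
        have hx0 : x0 ∈ pvOcc ringL c := by rw [hxs]; simp
        have hx0b := pvOcc_bounds hx0
        have : pvMO [x0] (fun x => pvD (ringL.length : Int) cur x + pvG ringL (ringL.length : Int) ks x)
            = pvD (ringL.length : Int) cur x0 + pvG ringL (ringL.length : Int) ks x0 := rfl
        rw [this, ih hks' hx0b.1 hx0b.2]
        have habs : |x0 - cur| = |cur - x0| := abs_sub_comm _ _
        unfold pvD
        rw [habs]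
    · rw [if_neg hlen]
      have hprm := pvPr_mem (cur := cur) hocc hsort
      have hplm := pvPl_mem (cur := cur) hocc hsort
      have hprb := pvOcc_bounds hprm
      have hplb := pvOcc_bounds hplm
      rw [ih hks' hprb.1 hprb.2, ih hks' hplb.1 hplb.2]
      have eabs : ∀ z : Int, min |z - cur| ((ringL.length : Int) - |cur - z|)
          = pvD (ringL.length : Int) cur z := by
        intro z; unfold pvD; rw [abs_sub_comm z cur]
      rw [eabs, eabs]
      apply le_antisymm
      · apply pvLe_MO hocc
        intro x hxm
        have hxb := pvOcc_bounds hxm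
        by_cases hcx : cur ∈ pvOcc ringL c
        · have hpl := pvPl_self hsort hcx
          have hlip := pvG_lipschitz (ks := ks) hks' hc hc' hxb.1 hxb.2
          have hdc := pvD_self hc hc'
          have hm : min (pvD (ringL.length : Int) cur (pvPr (pvOcc ringL c) cur) + pvG ringL (ringL.length : Int) ks (pvPr (pvOcc ringL c) cur))
                     (pvD (ringL.length : Int) cur (pvPl (pvOcc ringL c) cur) + pvG ringL (ringL.length : Int) ks (pvPl (pvOcc ringL c) cur))
              ≤ pvD (ringL.length : Int) cur (pvPl (pvOcc ringL c) cur) + pvG ringL (ringL.length : Int) ks (pvPl (pvOcc ringL c) cur) :=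
            min_le_right _ _
          have heq : pvD (ringL.length : Int) cur (pvPl (pvOcc ringL c) cur) + pvG ringL (ringL.length : Int) ks (pvPl (pvOcc ringL c) cur)
              = pvD (ringL.length : Int) cur cur + pvG ringL (ringL.length : Int) ks cur := by rw [hpl]
          omega
        · rcases pvNeighbor hocc hsort hbd hc hc' hcx hxm with h | h
          · have hlip := pvG_lipschitz (ks := ks) hks' hprb.1 hprb.2 hxb.1 hxb.2
            have hdcomm := pvD_comm (ringL.length : Int) (pvPr (pvOcc ringL c) cur) x
            have hm : min (pvD (ringL.length : Int) cur (pvPr (pvOcc ringL c) cur) + pvG ringL (ringL.length : Int) ks (pvPr (pvOcc ringL c) cur))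
                     (pvD (ringL.length : Int) cur (pvPl (pvOcc ringL c) cur) + pvG ringL (ringL.length : Int) ks (pvPl (pvOcc ringL c) cur))
              ≤ pvD (ringL.length : Int) cur (pvPr (pvOcc ringL c) cur) + pvG ringL (ringL.length : Int) ks (pvPr (pvOcc ringL c) cur) :=
              min_le_left _ _
            omega
          · have hlip := pvG_lipschitz (ks := ks) hks' hplb.1 hplb.2 hxb.1 hxb.2
            have hdcomm := pvD_comm (ringL.length : Int) (pvPl (pvOcc ringL c) cur) x
            have hm : min (pvD (ringL.length : Int) cur (pvPr (pvOcc ringL c) cur) + pvG ringL (ringL.length : Int) ks (pvPr (pvOcc ringL c) cur))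
                     (pvD (ringL.length : Int) cur (pvPl (pvOcc ringL c) cur) + pvG ringL (ringL.length : Int) ks (pvPl (pvOcc ringL c) cur))
              ≤ pvD (ringL.length : Int) cur (pvPl (pvOcc ringL c) cur) + pvG ringL (ringL.length : Int) ks (pvPl (pvOcc ringL c) cur) :=
              min_le_right _ _
            omega
      · apply le_min
        · exact pvMO_le hprm
        · exact pvMO_le hplm

theorem pvPr_def (xs : List Int) (cur : Int) :
    (if ((PySem.List.bisectRight xs cur : Int)) ≠ (xs.length : Int) then
        PySem.List.pyGetD xs ((PySem.List.bisectRight xs cur : Int)) 0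
      else PySem.List.pyGetD xs 0 0) = pvPr xs cur := rfl

theorem pvPl_def (xs : List Int) (cur : Int) :
    (if ((PySem.List.bisectRight xs cur : Int)) ≠ 0 then
        PySem.List.pyGetD xs ((PySem.List.bisectRight xs cur : Int) - 1) 0
      else PySem.List.pyGetD xs (-1) 0) = pvPl xs cur := rfl

-- ---- A's dfs computes pvN (memo invariant) ----
def pvMG (ringL : List Char) (n : Int) (keyL : List Char) (memo : PySem.Dict (Int × Int) Int) : Prop :=
  ∀ cur p v, memo.get? (cur, p) = some v → 0 ≤ p ∧ v = pvN ringL n (keyL.drop p.toNat) cur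

theorem pvDfsA_eq {ringL keyL : List Char} {n : Int} :
    ∀ (fuel : Nat) (cur p : Int) (memo : PySem.Dict (Int × Int) Int),
      0 ≤ p → p ≤ (keyL.length : Int) → ((keyL.length : Int) - p).toNat < fuel →
      pvMG ringL n keyL memo →
      (pvDfsA (pvBuildPos ringL) keyL n (keyL.length : Int) fuel cur p memo).1
          = pvN ringL n (keyL.drop p.toNat) cur ∧
        pvMG ringL n keyL (pvDfsA (pvBuildPos ringL) keyL n (keyL.length : Int) fuel cur p memo).2 := by
  intro fuel
  induction fuel with
  | zero => intro cur p memo _ _ h2 _; omega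
  | succ fuel ih =>
    intro cur p memo hp0 hpm hfuel hmg
    by_cases hpeq : p = (keyL.length : Int)
    · simp only [pvDfsA, if_pos hpeq]
      refine ⟨?_, hmg⟩
      have hd : keyL.drop p.toNat = [] := List.drop_of_length_le (by omega)
      rw [hd]; rfl
    · have hplt : p < (keyL.length : Int) := lt_of_le_of_ne hpm hpeq
      have hptn : p.toNat < keyL.length := by omega
      have hdrop : keyL.drop p.toNat = keyL[p.toNat] :: keyL.drop (p.toNat + 1) :=
        List.drop_eq_getElem_cons hptn
      have hc : PySem.List.pyGetD keyL p ' ' = keyL[p.toNat] :=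
        PySem.List.pyGetD_eq_getElem keyL ' ' hp0 (by exact_mod_cast hplt)
      have hsucc : (p + 1).toNat = p.toNat + 1 := by omega
      simp only [pvDfsA, if_neg hpeq]
      cases hget : memo.get? (cur, p) with
      | some v =>
        simp only
        exact ⟨(hmg cur p v hget).2, hmg⟩
      | none =>
        simp only [hc, pvBuildPos_getD]
        rw [hdrop]
        simp only [pvN]
        by_cases hlen : (pvOcc ringL keyL[p.toNat]).length = 1
        · rw [if_pos hlen, if_pos hlen]
          obtain ⟨ha, hb⟩ := ih (PySem.List.pyGetD (pvOcc ringL keyL[p.toNat]) 0 0) (p + 1) memo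
            (by omega) (by omega) (by omega) hmg
          rw [hsucc] at ha
          refine ⟨by rw [ha], ?_⟩
          intro cur' p' v' hget'
          rw [PySem.Dict.get?_insert] at hget'
          split_ifs at hget' with heq
          · cases hget'
            injection heq with hceq hpeq'
            subst hceq; subst hpeq'
            exact ⟨hp0, by rw [hdrop]; simp only [pvN]; rw [if_pos hlen, ha]⟩
          · exact hb _ _ _ hget'
        · rw [if_neg hlen, if_neg hlen, pvPr_def, pvPl_def]
          obtain ⟨ha1, hb1⟩ := ih (pvPr (pvOcc ringL keyL[p.toNat]) cur) (p + 1) memo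
            (by omega) (by omega) (by omega) hmg
          obtain ⟨ha2, hb2⟩ := ih (pvPl (pvOcc ringL keyL[p.toNat]) cur) (p + 1)
            (pvDfsA (pvBuildPos ringL) keyL n (keyL.length : Int) fuel
              (pvPr (pvOcc ringL keyL[p.toNat]) cur) (p + 1) memo).2
            (by omega) (by omega) (by omega) hb1
          rw [hsucc] at ha1 ha2
          refine ⟨by rw [ha1, ha2], ?_⟩
          intro cur' p' v' hget'
          rw [PySem.Dict.get?_insert] at hget'
          split_ifs at hget' with heq
          · cases hget'
            injection heq with hceq hpeq'
            subst hceq; subst hpeq'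
            refine ⟨hp0, ?_⟩
            rw [hdrop]
            simp only [pvN]
            rw [if_neg hlen, ha1, ha2]
          · exact hb2 _ _ _ hget'

-- ---- B's layered loop computes pvG ----
theorem pvB_loop {ringL : List Char} {ks : List Char} :
    ∀ (prev : List Int) (f : Int → Int), prev ≠ [] → (∀ c ∈ ks, c ∈ ringL) →
      pvMinList ((ks.foldl
          (fun (pc : List Int × List Int) c =>
            let cur := pvOcc ringL c
            (cur, cur.map (pvStepB (ringL.length : Int) pc.1 pc.2))) (prev, prev.map f)).2)
        = pvMO prev (fun i => f i + pvG ringL (ringL.length : Int) ks i) := by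
  induction ks with
  | nil =>
    intro prev f hne hks
    simp only [List.foldl_nil]
    have h : pvMO prev (fun i => f i + pvG ringL (ringL.length : Int) [] i) = pvMO prev f :=
      pvMO_congr (by intro x hx; simp [pvG])
    rw [h]; rfl
  | cons c ks ih =>
    intro prev f hne hks
    simp only [List.foldl_cons]
    have hcur_ne : pvOcc ringL c ≠ [] := pvOcc_ne_nil (hks c (by simp))
    have hstep : ∀ j, pvStepB (ringL.length : Int) prev (prev.map f) j
        = pvMO prev (fun i => f i + pvD (ringL.length : Int) i j) := by
      intro j
      unfold pvStepB pvMO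
      have hz : prev.zip (prev.map f) = prev.map (fun i => (i, f i)) := by
        rw [← List.zip_map' (f := fun i => i) (g := f), List.map_id']
      rw [hz, List.map_map]
      congr 1
      apply List.map_congr_left
      intro i hi
      simp only [Function.comp]
      unfold pvD
      rw [abs_sub_comm j i]
    have hmap : (pvOcc ringL c).map (pvStepB (ringL.length : Int) prev (prev.map f))
        = (pvOcc ringL c).map (fun j => pvMO prev (fun i => f i + pvD (ringL.length : Int) i j)) :=
      List.map_congr_left (fun j _ => hstep j)
    rw [hmap,
      ih (pvOcc ringL c) (fun j => pvMO prev (fun i => f i + pvD (ringL.length : Int) i j))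
        hcur_ne (fun c' hc' => hks c' (by simp [hc'])),
      pvMO_exchange (g := fun i j => f i + pvD (ringL.length : Int) i j)
        (h := pvG ringL (ringL.length : Int) ks) hcur_ne hne]
    apply pvMO_congr
    intro i hi
    rw [pvG_eq_MO]
    have h1 : pvMO (pvOcc ringL c) (fun j => f i + pvD (ringL.length : Int) i j + pvG ringL (ringL.length : Int) ks j)
        = pvMO (pvOcc ringL c) (fun j => f i + (pvD (ringL.length : Int) i j + pvG ringL (ringL.length : Int) ks j)) :=
      pvMO_congr (by intro j hj; ring)
    rw [h1, pvMO_add_const hcur_ne]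

-- ===== VERDICT (by name: the statement is the Claim_ definition above) =====
theorem findRotateSteps3_spec : Claim_equal_findRotateSteps3 := by
  unfold Claim_equal_findRotateSteps3
  intro ring key hdom hpre
  unfold Spec_findRotateSteps3 findRotateSteps3 findRotateSteps3_alt
  unfold Pre_findRotateSteps3 at hpre
  have hpreM : ∀ c ∈ key.toList, c ∈ ring.toList := by
    intro c hc
    have := List.all_eq_true.1 hpre c hc
    simpa using this
  cases hk : key.toList with
  | nil => simp [pvDfsA]
  | cons k0 krest =>
    simp only [hk]
    have hpre' : ∀ c ∈ k0 :: krest, c ∈ ring.toList := by rw [← hk]; exact hpreM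
    have hk0 : k0 ∈ ring.toList := hpre' k0 (by simp)
    have hn : 0 < ring.toList.length := List.length_pos_of_mem hk0
    have hmge : pvMG ring.toList ((ring.toList.length : Int)) (k0 :: krest) PySem.Dict.empty := by
      intro cur p v h
      rw [PySem.Dict.get?_empty] at h
      cases h
    have hA := pvDfsA_eq (ringL := ring.toList) (keyL := k0 :: krest)
      (n := (ring.toList.length : Int)) ((k0 :: krest).length + 1) 0 0 PySem.Dict.empty
      le_rfl (by positivity) (by omega) hmge
    rw [hA.1]
    simp only [Int.toNat_zero, List.drop_zero]
    rw [pvN_eq_pvG hpre' le_rfl (by exact_mod_cast hn)]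
    have hocc0 : pvOcc ring.toList k0 ≠ [] := pvOcc_ne_nil hk0
    rw [pvB_loop (ks := krest) (pvOcc ring.toList k0)
      (fun j => min j ((ring.toList.length : Int) - j)) hocc0
      (fun c hc => hpre' c (by simp [hc]))]
    congr 1
    rw [pvG_eq_MO]
    apply Eq.symm
    apply pvMO_congr
    intro i hi
    have hb := pvOcc_bounds hi
    have habs : |(0 : Int) - i| = i := by
      rw [abs_sub_comm, sub_zero, abs_of_nonneg hb.1]
    unfold pvD
    rw [habs]
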